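-- pv_equiv track=rewrite | github.com/isutare412/programming-challenges | Baekjoon/tmp/history0011.py | triangle_helper
-- ===== SOURCE A (Python) =====
-- def triangle_helper(height, row):
--     if height == 3:
--         if row == 0:
--             return '  *'
--         elif row == 1:
--             return ' * *'
--         else:
--             return '*****'
--
--     half = height // 2
--     if row < half:
--         return ' ' * half + triangle_helper(half, row)
--     else:
--         fixedrow = row - half
--         substr = triangle_helper(half, fixedrow)
--         return substr + ' ' * (half - fixedrow) + substr
-- ===== SOURCE B (Python) =====
-- def triangle_helper(height, row):
--     # Iterative: descend while recording ops, then fold them in reverse.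
--     ops = []
--     while height != 3:
--         half = height // 2
--         if row < half:
--             ops.append((True, half))      # prefix of `half` spaces
--         else:
--             row -= half
--             ops.append((False, half - row))  # wrap: s + spaces + s
--         height = half
--     if row == 0:
--         s = '  *'
--     elif row == 1:
--         s = ' * *'
--     else:
--         s = '*****'
--     for prefix, w in reversed(ops):
--         if prefix:
--             s = ' ' * w + s
--         else:
--             s = s + ' ' * w + s
--     return s
-- ===== Notes on version B (the rewrite author's own statement) =====
-- stated objective: alternative
-- what changed: Replaces the recursion by a single descending loop that records prefix/wrap operations and then folds the recorded operations in reverse over the base-row string.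
import Mathlib
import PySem

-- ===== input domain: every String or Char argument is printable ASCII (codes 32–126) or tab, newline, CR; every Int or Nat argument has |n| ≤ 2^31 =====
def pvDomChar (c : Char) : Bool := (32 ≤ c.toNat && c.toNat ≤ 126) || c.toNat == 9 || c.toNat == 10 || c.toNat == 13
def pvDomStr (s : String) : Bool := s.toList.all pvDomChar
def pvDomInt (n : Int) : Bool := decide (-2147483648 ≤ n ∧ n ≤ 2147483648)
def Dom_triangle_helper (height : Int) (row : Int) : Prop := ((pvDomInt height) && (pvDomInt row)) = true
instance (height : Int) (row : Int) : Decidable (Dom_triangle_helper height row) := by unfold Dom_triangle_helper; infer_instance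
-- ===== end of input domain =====

-- B replaces A's recursion by one descending loop recording prefix/wrap operations
-- that are then folded in reverse over the base-row string (alternative decomposition).

-- ' ' * n  (Python string repetition; a negative count yields '', matching .toNat)
def pySpaces (n : Int) : String := String.ofList (List.replicate n.toNat ' ')

-- the height == 3 base case, identical three-branch conditional in both Pythons
def pyBaseRow (row : Int) : String :=
  if row = 0 then "  *" else if row = 1 then " * *" else "*****"

-- ===== PORT A =====
-- fuel makes the (non-terminating outside Pre_) recursion total; never exhausted on Pre_
def triGoA : Nat → Int → Int → String
  | 0, _, _ => ""
  | f+1, height, row =>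
    if height = 3 then pyBaseRow row
    else
      let half := PySem.Int.floordiv height 2
      if row < half then pySpaces half ++ triGoA f half row
      else
        let fixedrow := row - half
        let substr := triGoA f half fixedrow
        substr ++ pySpaces (half - fixedrow) ++ substr

def triangle_helper (height : Int) (row : Int) : String := triGoA 64 height row

-- ===== PORT B =====
-- the while-loop of Source B, with fuel (never exhausted on Pre_): returns (ops, row, ok)
def triLoop : Nat → Int → Int → List (Bool × Int) → List (Bool × Int) × Int × Bool
  | 0, _, row, ops => (ops, row, false)
  | f+1, height, row, ops =>
    if height = 3 then (ops, row, true)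
    else
      let half := PySem.Int.floordiv height 2
      if row < half then triLoop f half row (ops ++ [(true, half)])
      else triLoop f half (row - half) (ops ++ [(false, half - (row - half))])

-- body of Source B's `for prefix, w in reversed(ops)` loop
def triStep (s : String) (op : Bool × Int) : String :=
  if op.1 then pySpaces op.2 ++ s else s ++ pySpaces op.2 ++ s

def triangle_helper_alt (height : Int) (row : Int) : String :=
  let t := triLoop 64 height row []
  if t.2.2 then t.1.reverse.foldl triStep (pyBaseRow t.2.1) else ""

-- ===== PRECONDITION & SPEC =====
-- A's recursion returns exactly when repeated floor-halving of height hits 3, i.e.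
-- 3·2^k ≤ height < 4·2^k for some k; on every other height A raises RecursionError
-- (and Source B's loop does not terminate there either), so exactly those are excluded.
def Pre_triangle_helper (height : Int) (row : Int) : Prop :=
  ∃ k : Nat, 3 * 2 ^ k ≤ height ∧ height < 4 * 2 ^ k

-- any witness k is forced to be at most log2(height) (since 2^k ≤ height), so the
-- unbounded existential is equivalent to a bounded, quickly decidable one
instance (height : Int) (row : Int) : Decidable (Pre_triangle_helper height row) :=
  decidable_of_iff
    (∃ k : Nat, k < height.toNat.log2 + 1 ∧ 3 * 2 ^ k ≤ height ∧ height < 4 * 2 ^ k)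
    (by
      constructor
      · rintro ⟨k, _, hk⟩; exact ⟨k, hk⟩
      · rintro ⟨k, h1, h2⟩
        refine ⟨k, Nat.lt_succ_of_le ?_, h1, h2⟩
        have hp : (0:Int) < 2 ^ k := pow_pos (by norm_num) k
        have hle : (2:Int) ^ k ≤ height := by nlinarith
        have hpos : (0:Int) ≤ height := le_of_lt (lt_of_lt_of_le hp hle)
        have hle' : 2 ^ k ≤ height.toNat := by
          zify
          rwa [Int.toNat_of_nonneg hpos]
        have hne : height.toNat ≠ 0 := by
          have := Nat.one_le_two_pow (n := k); omega
        exact (Nat.le_log2 hne).mpr hle')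

def pvWitness_triangle_helper : Int × Int := (6, 1)

def Spec_triangle_helper (height : Int) (row : Int) (out : String) : Prop := out = triangle_helper_alt height row
instance (height : Int) (row : Int) (out : String) : Decidable (Spec_triangle_helper height row out) := by unfold Spec_triangle_helper; infer_instance

-- ===== CLAIM (what is proved, stated in full; the proofs are below) =====
def Claim_equal_triangle_helper : Prop := ∀ (height : Int) (row : Int), Dom_triangle_helper height row → Pre_triangle_helper height row → Spec_triangle_helper height row (triangle_helper height row)

-- ===== LEMMAS AND PROOFS =====

-- the accumulator of triLoop is a pure prefix of the result
theorem triLoop_acc (f : Nat) :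
    ∀ (h r : Int) (acc : List (Bool × Int)),
      triLoop f h r acc = (acc ++ (triLoop f h r []).1, (triLoop f h r []).2) := by
  induction f with
  | zero => intro h r acc; simp [triLoop]
  | succ f ih =>
    intro h r acc
    by_cases h3 : h = 3
    · simp [triLoop, h3]
    · simp only [triLoop, if_neg h3]
      by_cases hr : r < PySem.Int.floordiv h 2
      · simp only [if_pos hr]
        rw [ih _ _ (acc ++ _), ih _ _ ([] ++ _)]
        simp
      · simp only [if_neg hr]
        rw [ih _ _ (acc ++ _), ih _ _ ([] ++ _)]
        simp

-- whenever the loop reaches height 3, folding the recorded ops in reverse rebuilds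
-- exactly A's recursive result
theorem triLoop_fold_eq (f : Nat) :
    ∀ (h r : Int), (triLoop f h r []).2.2 = true →
      (triLoop f h r []).1.reverse.foldl triStep (pyBaseRow (triLoop f h r []).2.1)
        = triGoA f h r := by
  induction f with
  | zero => intro h r hok; simp [triLoop] at hok
  | succ f ih =>
    intro h r hok
    by_cases h3 : h = 3
    · simp [triLoop, h3, triGoA]
    · simp only [triLoop, if_neg h3] at hok ⊢
      by_cases hr : r < PySem.Int.floordiv h 2
      · simp only [if_pos hr] at hok ⊢
        rw [triLoop_acc] at hok ⊢
        simp only at hok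
        have := ih (PySem.Int.floordiv h 2) r hok
        simp only [List.nil_append, List.reverse_append, List.reverse_cons,
          List.reverse_nil, List.foldl_append, List.foldl_cons, List.foldl_nil]
        rw [this]
        conv_rhs => rw [triGoA]
        rw [if_neg h3]
        simp only [if_pos hr, triStep]
        rfl
      · simp only [if_neg hr] at hok ⊢
        rw [triLoop_acc] at hok ⊢
        simp only at hok
        have := ih (PySem.Int.floordiv h 2) (r - PySem.Int.floordiv h 2) hok
        simp only [List.nil_append, List.reverse_append, List.reverse_cons,
          List.reverse_nil, List.foldl_append, List.foldl_cons, List.foldl_nil]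
        rw [this]
        conv_rhs => rw [triGoA]
        rw [if_neg h3]
        simp only [if_neg hr, triStep]
        rfl

-- on every height whose floor-halving chain reaches 3 (with k below the fuel), the loop succeeds
theorem triLoop_ok (k : Nat) :
    ∀ (f : Nat) (h r : Int), 3 * 2 ^ k ≤ h → h < 4 * 2 ^ k → k < f →
      (triLoop f h r []).2.2 = true := by
  induction k with
  | zero =>
    intro f h r h1 h2 hf
    obtain ⟨f, rfl⟩ : ∃ f', f = f' + 1 := ⟨f - 1, by omega⟩
    have h3 : h = 3 := by norm_num at h1 h2; omega
    simp [triLoop, h3]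
  | succ k ih =>
    intro f h r h1 h2 hf
    obtain ⟨f, rfl⟩ : ∃ f', f = f' + 1 := ⟨f - 1, by omega⟩
    have hp : (0:Int) < 2 ^ k := pow_pos (by norm_num) k
    have hne : h ≠ 3 := by rw [pow_succ] at h1; nlinarith
    have hlo : 3 * 2 ^ k ≤ PySem.Int.floordiv h 2 := by
      rw [PySem.Int.le_floordiv_iff_mul_le (by norm_num)]
      rw [pow_succ] at h1; nlinarith
    have hhi : PySem.Int.floordiv h 2 < 4 * 2 ^ k := by
      rw [PySem.Int.floordiv_lt_iff_lt_mul (by norm_num)]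
      rw [pow_succ] at h2; nlinarith
    simp only [triLoop, if_neg hne]
    by_cases hr : r < PySem.Int.floordiv h 2
    · rw [if_pos hr, triLoop_acc]; exact ih f _ r hlo hhi (by omega)
    · rw [if_neg hr, triLoop_acc]; exact ih f _ _ hlo hhi (by omega)

-- ===== VERDICT (by name: the statement is the Claim_ definition above) =====
theorem triangle_helper_spec : Claim_equal_triangle_helper := by
  intro height row hdom hpre
  obtain ⟨k, h1, h2⟩ := hpre
  -- inside Dom, height ≤ 2^31 forces k ≤ 30, well below the fuel 64
  have hk : k < 64 := by
    by_contra hk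
    push Not at hk
    have hm : (2:Int) ^ (31:Nat) ≤ 2 ^ k :=
      pow_le_pow_right₀ (by norm_num) (by omega)
    have hd : height ≤ 2147483648 := by
      simp [Dom_triangle_helper, pvDomInt] at hdom; omega
    norm_num at hm
    nlinarith [pow_pos (show (0:Int) < 2 by norm_num) k]
  have hok := triLoop_ok k 64 height row h1 h2 hk
  unfold Spec_triangle_helper triangle_helper triangle_helper_alt
  rw [← triLoop_fold_eq 64 _ row hok]
  simp [hok]
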